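-- pv_equiv track=rewrite | github.com/naitikbhise/COMP6721-2 | generateWordFrequency.py | updateDictWords
-- ===== SOURCE A (Python) =====
-- def updateDictWords(dict_words, listOfTokens, postClass, AllClasses):
--     for token in listOfTokens:
--         if token not in dict_words:
--             dict_words[token] = {}
--             for className in AllClasses:
--                 dict_words[token][className] = 0
--         dict_words[token][postClass] += 1
--     return dict_words
-- ===== SOURCE B (Python) =====
-- def updateDictWords(dict_words, listOfTokens, postClass, AllClasses):
--     # Phase 0: frequency table of the tokens.
--     counts = {}
--     for t in listOfTokens:
--         counts[t] = counts.get(t, 0) + 1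
--     # Phase 1: update the rows that already exist, consuming their counts.
--     for key, inner in dict_words.items():
--         if key in counts:
--             inner[postClass] += counts.pop(key)
--     # Phase 2: the remaining counted tokens are all new; append a fresh row for each.
--     for token, c in counts.items():
--         row = {cls: 0 for cls in AllClasses}
--         row[postClass] += c
--         dict_words[token] = row
--     return dict_words
-- ===== Notes on version B (the rewrite author's own statement) =====
-- stated objective: alternative
-- what changed: B never loops over token occurrences: it builds a frequency table of listOfTokens once, then makes one pass over the existing dict entries applying (and popping) their whole counts, and finally appends a fresh zero row for each remaining (new) counted token; A instead increments per occurrence inside a single loop over listOfTokens.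
import Mathlib
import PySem

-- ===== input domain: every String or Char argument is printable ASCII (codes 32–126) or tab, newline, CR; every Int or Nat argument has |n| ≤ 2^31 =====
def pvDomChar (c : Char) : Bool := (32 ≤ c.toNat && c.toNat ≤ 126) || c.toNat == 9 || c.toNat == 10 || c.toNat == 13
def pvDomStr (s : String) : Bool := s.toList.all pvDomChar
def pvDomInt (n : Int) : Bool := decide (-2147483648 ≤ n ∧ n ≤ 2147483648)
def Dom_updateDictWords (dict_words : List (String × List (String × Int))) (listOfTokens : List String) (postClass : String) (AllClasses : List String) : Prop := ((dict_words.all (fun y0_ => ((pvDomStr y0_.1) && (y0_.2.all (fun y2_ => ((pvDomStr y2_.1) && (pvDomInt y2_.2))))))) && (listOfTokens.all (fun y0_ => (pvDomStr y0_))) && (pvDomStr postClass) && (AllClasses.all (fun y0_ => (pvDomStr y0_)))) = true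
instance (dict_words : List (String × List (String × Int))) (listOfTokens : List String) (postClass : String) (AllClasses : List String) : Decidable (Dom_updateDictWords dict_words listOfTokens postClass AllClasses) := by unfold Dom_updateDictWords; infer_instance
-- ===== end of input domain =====

-- B replaces A's per-occurrence loop over listOfTokens by three phases: a frequency table of the
-- tokens, one pass over the existing dict entries applying (and popping) their whole counts, and an
-- appending pass for the remaining (new) tokens (objective: alternative decomposition).
-- Both A and B mutate dict_words in place in Python; the equivalence proved here is about the RETURN value.

-- ===== PORT A =====
-- the zero-initialised inner dict  (A builds it with a for-loop over AllClasses)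
def pvZeroRow (AllClasses : List String) : PySem.Dict String Int :=
  AllClasses.foldl (fun inner className => inner.insert className 0) PySem.Dict.empty

-- one iteration of A's loop body: init the row if the token is new, then dict_words[token][postClass] += 1
def pvStepA (postClass : String) (AllClasses : List String)
    (d : PySem.Dict String (PySem.Dict String Int)) (token : String) :
    PySem.Dict String (PySem.Dict String Int) :=
  let d := if d.contains token then d else d.insert token (pvZeroRow AllClasses)
  d.modify token PySem.Dict.empty (fun inner => inner.modify postClass 0 (· + 1))

def updateDictWords (dict_words : List (String × List (String × Int))) (listOfTokens : List String) (postClass : String) (AllClasses : List String) : List (String × List (String × Int)) :=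
  ((listOfTokens.foldl (pvStepA postClass AllClasses)
      (PySem.Dict.mk (dict_words.map (fun p => (p.1, PySem.Dict.mk p.2))))).items).map
    (fun p => (p.1, p.2.items))

-- ===== PORT B =====
-- phase 0: counts[t] = counts.get(t, 0) + 1 over the tokens
def pvCountsB (listOfTokens : List String) : PySem.Dict String Int :=
  listOfTokens.foldl (fun counts t => counts.insert t (counts.getD t 0 + 1)) PySem.Dict.empty

-- the fresh row of phase 2: {cls: 0 for cls in AllClasses}, then row[postClass] += c
def pvRowB (postClass : String) (AllClasses : List String) (c : Int) : PySem.Dict String Int :=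
  let row := AllClasses.foldl (fun r cls => r.insert cls 0) PySem.Dict.empty
  row.modify postClass 0 (· + c)

-- phase 1 body: for (key, inner) in dict_words.items(): if key in counts: inner[postClass] += counts.pop(key)
def pvPhase1B (postClass : String)
    (st : PySem.Dict String (PySem.Dict String Int) × PySem.Dict String Int)
    (p : String × PySem.Dict String Int) :
    PySem.Dict String (PySem.Dict String Int) × PySem.Dict String Int :=
  if st.2.contains p.1 then
    (st.1.insert p.1 (p.2.modify postClass 0 (· + st.2.getD p.1 0)), st.2.erase p.1)
  else st

def updateDictWords_alt (dict_words : List (String × List (String × Int))) (listOfTokens : List String) (postClass : String) (AllClasses : List String) : List (String × List (String × Int)) :=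
  let counts := pvCountsB listOfTokens
  let d0 := PySem.Dict.mk (dict_words.map (fun p => (p.1, PySem.Dict.mk p.2)))
  let st := d0.items.foldl (pvPhase1B postClass) (d0, counts)
  let final := st.2.items.foldl (fun d q => d.insert q.1 (pvRowB postClass AllClasses q.2)) st.1
  final.items.map (fun p => (p.1, p.2.items))

-- ===== PRECONDITION & SPEC =====
-- Pre_ excludes (a) the inputs on which the Python A raises KeyError (B raises there too): an existing
-- token whose inner dict lacks postClass, or a new token while postClass is not in AllClasses; and
-- (b) dict_words lists with duplicate keys: dict_words is a Python dict, so its keys are necessarily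
-- distinct, and the behaviour of the list encoding on duplicate keys is an artefact of the encoding.
def Pre_updateDictWords (dict_words : List (String × List (String × Int))) (listOfTokens : List String) (postClass : String) (AllClasses : List String) : Prop :=
  (dict_words.map Prod.fst).Nodup ∧
  ∀ t ∈ listOfTokens,
    (∀ p ∈ dict_words, p.1 = t → postClass ∈ p.2.map Prod.fst) ∧
    (t ∉ dict_words.map Prod.fst → postClass ∈ AllClasses)
instance (dict_words : List (String × List (String × Int))) (listOfTokens : List String) (postClass : String) (AllClasses : List String) : Decidable (Pre_updateDictWords dict_words listOfTokens postClass AllClasses) := by unfold Pre_updateDictWords; infer_instance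

def pvWitness_updateDictWords : (List (String × List (String × Int))) × List String × String × List String :=
  ([("w", [("c1", 2), ("c2", 0)])], ["w", "v", "w"], "c1", ["c1", "c2"])

def Spec_updateDictWords (dict_words : List (String × List (String × Int))) (listOfTokens : List String) (postClass : String) (AllClasses : List String) (out : List (String × List (String × Int))) : Prop := out = updateDictWords_alt dict_words listOfTokens postClass AllClasses
instance (dict_words : List (String × List (String × Int))) (listOfTokens : List String) (postClass : String) (AllClasses : List String) (out : List (String × List (String × Int))) : Decidable (Spec_updateDictWords dict_words listOfTokens postClass AllClasses out) := by unfold Spec_updateDictWords; infer_instance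

-- ===== CLAIM (what is proved, stated in full; the proofs are below) =====
def Claim_equal_updateDictWords : Prop := ∀ (dict_words : List (String × List (String × Int))) (listOfTokens : List String) (postClass : String) (AllClasses : List String), Dom_updateDictWords dict_words listOfTokens postClass AllClasses → Pre_updateDictWords dict_words listOfTokens postClass AllClasses → Spec_updateDictWords dict_words listOfTokens postClass AllClasses (updateDictWords dict_words listOfTokens postClass AllClasses)

-- ===== LEMMAS AND PROOFS =====

-- proof-only abbreviation: one whole-count step at a token (A's c per-occurrence steps collapsed)
def pvStepB (postClass : String) (AllClasses : List String)
    (d : PySem.Dict String (PySem.Dict String Int)) (p : String × Int) :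
    PySem.Dict String (PySem.Dict String Int) :=
  let d := if d.contains p.1 then d else d.insert p.1 (pvZeroRow AllClasses)
  d.modify p.1 PySem.Dict.empty (fun inner => inner.modify postClass 0 (· + p.2))

theorem pv_key_upd {ν : Type} (t u : String) (a : ν) (p : String × ν) :
    ((if p.1 == t then (t,a) else p).1 == u) = (p.1 == u) := by
  by_cases h : p.1 = t <;> simp [h]

theorem pv_contains_mk_map {ν : Type} (l : List (String × ν)) (t u : String) (a : ν) :
    (PySem.Dict.mk (l.map (fun p => if p.1 == t then (t,a) else p))).contains u = (PySem.Dict.mk l).contains u := by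
  simp only [PySem.Dict.contains, List.any_map]
  congr 1
  funext p
  simpa using pv_key_upd t u a p

theorem pv_insert_comm {ν : Type} (d : PySem.Dict String ν) {t u : String} (a b : ν)
    (hne : u ≠ t) (ht : d.contains t = true) :
    (PySem.Dict.insert (PySem.Dict.insert d t a) u b) = PySem.Dict.insert (PySem.Dict.insert d u b) t a := by
  have e1 : PySem.Dict.insert d t a = PySem.Dict.mk (d.items.map (fun p => if p.1 == t then (t,a) else p)) := by
    simp [PySem.Dict.insert, ht]
  by_cases hu : d.contains u = true
  · have e2 : PySem.Dict.insert d u b = PySem.Dict.mk (d.items.map (fun p => if p.1 == u then (u,b) else p)) := by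
      simp [PySem.Dict.insert, hu]
    have c1 : (PySem.Dict.mk (d.items.map (fun p => if p.1 == t then (t,a) else p))).contains u = true := by
      rw [pv_contains_mk_map]; exact hu
    have c2 : (PySem.Dict.mk (d.items.map (fun p => if p.1 == u then (u,b) else p))).contains t = true := by
      rw [pv_contains_mk_map]; exact ht
    rw [e1, e2, PySem.Dict.insert, PySem.Dict.insert, if_pos c1, if_pos c2]
    congr 1
    simp only [List.map_map]
    apply List.map_congr_left
    rintro ⟨x, y⟩ _
    by_cases h3 : x = t <;> by_cases h4 : x = u <;>
      simp_all [Function.comp, Ne.symm hne]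
  · have hu' : d.contains u = false := by simpa using hu
    have e2 : PySem.Dict.insert d u b = PySem.Dict.mk (d.items ++ [(u,b)]) := by
      simp [PySem.Dict.insert, hu']
    have c1 : (PySem.Dict.mk (d.items.map (fun p => if p.1 == t then (t,a) else p))).contains u = false := by
      rw [pv_contains_mk_map]; exact hu'
    have c2 : (PySem.Dict.mk (d.items ++ [(u,b)])).contains t = true := by
      simp only [PySem.Dict.contains] at ht ⊢
      simp [ht]
    rw [e1, e2, PySem.Dict.insert, PySem.Dict.insert, if_neg (by rw [c1]; simp), if_pos c2]
    congr 1
    simp only [List.map_append]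
    congr 1
    simp only [List.map_cons, List.map_nil]
    rw [if_neg (by simpa using hne)]

-- modify twice at the same key composes
theorem pv_modify_modify {ν : Type} (d : PySem.Dict String ν) (k : String) (e : ν) (f g : ν → ν) :
    (PySem.Dict.modify (PySem.Dict.modify d k e f) k e g) = PySem.Dict.modify d k e (fun x => g (f x)) := by
  simp [PySem.Dict.modify, PySem.Dict.getD_insert_self, PySem.Dict.insert_insert_self]

-- evaluating one pvStepB when the key is already present
theorem pv_stepB_of_contains (pc : String) (ac : List String) (d : PySem.Dict String (PySem.Dict String Int))
    (u : String) (c : Int) (hu : d.contains u = true) :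
    pvStepB pc ac d (u, c) = d.insert u ((d.getD u PySem.Dict.empty).modify pc 0 (· + c)) := by
  simp only [pvStepB]
  rw [if_pos hu]
  rfl

-- evaluating one pvStepB when the key is new
theorem pv_stepB_of_not_contains (pc : String) (ac : List String) (d : PySem.Dict String (PySem.Dict String Int))
    (u : String) (c : Int) (hu : d.contains u = false) :
    pvStepB pc ac d (u, c) = (d.insert u (pvZeroRow ac)).insert u ((pvZeroRow ac).modify pc 0 (· + c)) := by
  simp only [pvStepB]
  rw [if_neg (by simp [hu])]
  show (d.insert u (pvZeroRow ac)).insert u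
      (((d.insert u (pvZeroRow ac)).getD u PySem.Dict.empty).modify pc 0 (· + c)) = _
  rw [PySem.Dict.getD_insert_self]

-- a pvStepB keeps every present key present
theorem pv_contains_stepB (pc : String) (ac : List String) (d : PySem.Dict String (PySem.Dict String Int))
    (p : String × Int) {t : String} (ht : d.contains t = true) :
    (pvStepB pc ac d p).contains t = true := by
  obtain ⟨u, c⟩ := p
  by_cases hu : d.contains u = true
  · rw [pv_stepB_of_contains pc ac d u c hu]
    simp [PySem.Dict.contains_insert, ht]
  · rw [pv_stepB_of_not_contains pc ac d u c (by simpa using hu)]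
    simp [PySem.Dict.contains_insert, ht]

-- the key just stepped on is present afterwards
theorem pv_contains_stepB_self (pc : String) (ac : List String) (d : PySem.Dict String (PySem.Dict String Int))
    (t : String) (c : Int) : (pvStepB pc ac d (t, c)).contains t = true := by
  by_cases h : d.contains t = true
  · rw [pv_stepB_of_contains pc ac d t c h]
    simp
  · rw [pv_stepB_of_not_contains pc ac d t c (by simpa using h)]
    simp

-- two pvStepB at distinct keys commute when the first key is already present
theorem pv_stepB_comm (pc : String) (ac : List String) (d : PySem.Dict String (PySem.Dict String Int))
    (t : String) (c₁ : Int) (q : String × Int) (hne : q.1 ≠ t) (ht : d.contains t = true) :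
    pvStepB pc ac (pvStepB pc ac d (t, c₁)) q = pvStepB pc ac (pvStepB pc ac d q) (t, c₁) := by
  obtain ⟨u, c₂⟩ := q
  simp only at hne
  rw [pv_stepB_of_contains pc ac d t c₁ ht]
  by_cases hu : d.contains u = true
  · have cu : (d.insert t ((d.getD t PySem.Dict.empty).modify pc 0 (· + c₁))).contains u = true := by
      simp [PySem.Dict.contains_insert, hu]
    rw [pv_stepB_of_contains pc ac _ u c₂ cu,
        pv_stepB_of_contains pc ac d u c₂ hu]
    have ct2 : (d.insert u ((d.getD u PySem.Dict.empty).modify pc 0 (· + c₂))).contains t = true := by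
      simp [PySem.Dict.contains_insert, ht]
    rw [pv_stepB_of_contains pc ac _ t c₁ ct2,
        PySem.Dict.getD_insert_of_ne _ _ _ hne,
        PySem.Dict.getD_insert_of_ne _ _ _ (Ne.symm hne)]
    exact pv_insert_comm d _ _ hne ht
  · have hu' : d.contains u = false := by simpa using hu
    have cu : (d.insert t ((d.getD t PySem.Dict.empty).modify pc 0 (· + c₁))).contains u = false := by
      simp [PySem.Dict.contains_insert, hu', hne]
    rw [pv_stepB_of_not_contains pc ac _ u c₂ cu,
        pv_stepB_of_not_contains pc ac d u c₂ hu',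
        PySem.Dict.insert_insert_self, PySem.Dict.insert_insert_self]
    have ct2 : (d.insert u ((pvZeroRow ac).modify pc 0 (· + c₂))).contains t = true := by
      simp [PySem.Dict.contains_insert, ht]
    rw [pv_stepB_of_contains pc ac _ t c₁ ct2,
        PySem.Dict.getD_insert_of_ne _ _ _ (Ne.symm hne)]
    exact pv_insert_comm d _ _ hne ht

-- a step of count v then a step of count 1 at the same key is a step of count v+1
theorem pv_stepB_split (pc : String) (ac : List String) (d : PySem.Dict String (PySem.Dict String Int))
    (t : String) (v : Int) :
    pvStepB pc ac (pvStepB pc ac d (t, v)) (t, 1) = pvStepB pc ac d (t, v + 1) := by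
  have hg : ∀ inner : PySem.Dict String Int,
      ((inner.modify pc 0 (· + v)).modify pc 0 (· + 1)) = inner.modify pc 0 (· + (v + 1)) := by
    intro inner
    rw [pv_modify_modify]
    congr 1
    funext x
    ring
  by_cases h : d.contains t = true
  · rw [pv_stepB_of_contains pc ac d t v h,
        pv_stepB_of_contains pc ac d t (v + 1) h]
    have c1 : (d.insert t ((d.getD t PySem.Dict.empty).modify pc 0 (· + v))).contains t = true := by
      simp
    rw [pv_stepB_of_contains pc ac _ t 1 c1,
        PySem.Dict.getD_insert_self, PySem.Dict.insert_insert_self, hg]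
  · have h' : d.contains t = false := by simpa using h
    rw [pv_stepB_of_not_contains pc ac d t v h',
        pv_stepB_of_not_contains pc ac d t (v + 1) h',
        PySem.Dict.insert_insert_self, PySem.Dict.insert_insert_self]
    have c1 : (d.insert t ((pvZeroRow ac).modify pc 0 (· + v))).contains t = true := by
      simp
    rw [pv_stepB_of_contains pc ac _ t 1 c1,
        PySem.Dict.getD_insert_self, PySem.Dict.insert_insert_self, hg]

-- a step at a present key commutes out of a fold over items with other keys
theorem pv_foldl_stepB_push (pc : String) (ac : List String) (l : List (String × Int)) :
    ∀ (d : PySem.Dict String (PySem.Dict String Int)) (t : String) (c : Int),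
      d.contains t = true → (∀ p ∈ l, p.1 ≠ t) →
      l.foldl (pvStepB pc ac) (pvStepB pc ac d (t, c)) = pvStepB pc ac (l.foldl (pvStepB pc ac) d) (t, c) := by
  induction l with
  | nil => intro d t c _ _; rfl
  | cons p l ih =>
    intro d t c ht hl
    simp only [List.foldl_cons]
    rw [pv_stepB_comm pc ac d t c p (hl p (List.mem_cons_self)) ht]
    exact ih (pvStepB pc ac d p) t c (pv_contains_stepB pc ac d p ht)
      (fun q hq => hl q (List.mem_cons_of_mem p hq))

-- bumping one key's count in the item list, then applying, equals applying then one extra step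
theorem pv_main_cons (pc : String) (ac : List String) (t : String) :
    ∀ (l : List (String × Int)) (d : PySem.Dict String (PySem.Dict String Int)),
      (l.map Prod.fst).Nodup →
      ((PySem.Dict.mk l).modify t 0 (fun x => x + 1)).items.foldl (pvStepB pc ac) d
        = pvStepB pc ac (l.foldl (pvStepB pc ac) d) (t, 1) := by
  intro l
  induction l with
  | nil =>
    intro d _
    show List.foldl (pvStepB pc ac) d [(t, 0 + 1)] = pvStepB pc ac d (t, 1)
    norm_num
  | cons p l ih =>
    intro d hnd
    have hnd' : (l.map Prod.fst).Nodup := (List.nodup_cons.mp (by simpa using hnd)).2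
    by_cases hpt : p.1 = t
    · have e0 : (p.1 == t) = true := by simpa using hpt
      have hkeys : ∀ q ∈ l, q.1 ≠ t := by
        intro q hq h
        have hnotin : p.1 ∉ l.map Prod.fst := (List.nodup_cons.mp (by simpa using hnd)).1
        exact hnotin (by rw [hpt, ← h]; exact List.mem_map_of_mem hq)
      have hgetD : (PySem.Dict.mk (p :: l)).getD t 0 = p.2 := by
        simp [PySem.Dict.getD, PySem.Dict.get?, e0]
      have hcont : (PySem.Dict.mk (p :: l)).contains t = true := by
        simp [PySem.Dict.contains, List.any_cons, e0]
      have hitems : ((PySem.Dict.mk (p :: l)).modify t 0 (fun x => x + 1)).items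
          = (t, p.2 + 1) :: l := by
        simp only [PySem.Dict.modify, hgetD, PySem.Dict.insert, hcont, if_true, List.map_cons, e0]
        rw [List.map_congr_left (g := id) (fun q hq => by simp [hkeys q hq])]
        simp
      rw [hitems]
      have hp : p = (t, p.2) := by rw [← hpt]
      rw [hp]
      simp only [List.foldl_cons]
      rw [← pv_stepB_split pc ac d t p.2]
      exact pv_foldl_stepB_push pc ac l (pvStepB pc ac d (t, p.2)) t 1
        (pv_contains_stepB_self pc ac d t p.2) hkeys
    · have e0 : (p.1 == t) = false := by simpa using hpt
      have hitems : ((PySem.Dict.mk (p :: l)).modify t 0 (fun x => x + 1)).items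
          = p :: ((PySem.Dict.mk l).modify t 0 (fun x => x + 1)).items := by
        simp only [PySem.Dict.modify, PySem.Dict.getD, PySem.Dict.get?, PySem.Dict.insert,
          PySem.Dict.contains, List.find?_cons, List.any_cons, e0, Bool.false_or]
        split_ifs with hc
        · simp only [List.map_cons, List.cons.injEq]
          constructor
          · rw [if_neg (by simpa using hpt)]
          · trivial
        · rfl
      rw [hitems]
      simp only [List.foldl_cons]
      exact ih (pvStepB pc ac d p) hnd'

-- occurrence-by-occurrence A steps = counter-items whole-count steps
theorem pv_fold_eq (pc : String) (ac : List String) (toks : List String) :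
    ∀ d, toks.foldl (pvStepA pc ac) d = (PySem.Dict.counter toks).items.foldl (pvStepB pc ac) d := by
  induction toks using List.reverseRecOn with
  | nil => intro d; rfl
  | append_singleton l t ih =>
    intro d
    rw [List.foldl_append, List.foldl_cons, List.foldl_nil, ih, PySem.Dict.counter_append_singleton]
    exact (pv_main_cons pc ac t (PySem.Dict.counter l).items d (PySem.Dict.nodup_keys_counter l)).symm

-- proof-only: the per-entry update of phase 1
def pvUpd (pc : String) (cnt : PySem.Dict String Int) (p : String × PySem.Dict String Int) :
    String × PySem.Dict String Int :=
  if cnt.contains p.1 then (p.1, p.2.modify pc 0 (· + cnt.getD p.1 0)) else p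

theorem pv_fst_upd (pc : String) (cnt : PySem.Dict String Int) (p : String × PySem.Dict String Int) :
    (pvUpd pc cnt p).1 = p.1 := by
  unfold pvUpd; split_ifs <;> rfl

-- characterization of the whole-count fold: existing entries updated in place, new keys appended
theorem pv_foldB_char (pc : String) (ac : List String) (l : List (String × Int)) :
    ∀ (d0 : PySem.Dict String (PySem.Dict String Int)),
      (l.map Prod.fst).Nodup → (d0.items.map Prod.fst).Nodup →
      (l.foldl (pvStepB pc ac) d0).items
        = d0.items.map (pvUpd pc (PySem.Dict.mk l))
          ++ (l.filter (fun q => !(d0.contains q.1))).map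
              (fun q => (q.1, (pvZeroRow ac).modify pc 0 (· + q.2))) := by
  induction l with
  | nil =>
    intro d0 _ _
    have h0 : ∀ p ∈ d0.items, pvUpd pc (PySem.Dict.mk []) p = id p := fun p _ => rfl
    rw [List.foldl_nil, List.map_congr_left h0, List.map_id]
    exact (List.append_nil _).symm
  | cons q l ih =>
    obtain ⟨t, c⟩ := q
    intro d0 hl hd0
    have htl : t ∉ l.map Prod.fst := (List.nodup_cons.mp (by simpa using hl)).1
    have hl' : (l.map Prod.fst).Nodup := (List.nodup_cons.mp (by simpa using hl)).2
    have hcl' : (PySem.Dict.mk l).contains t = false := by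
      simp only [PySem.Dict.contains, List.any_eq_false]
      intro p hp h
      have hpt : p.1 = t := eq_of_beq h
      exact htl (hpt ▸ List.mem_map_of_mem hp)
    have hmk_cons_c : ∀ u : String, u ≠ t →
        (PySem.Dict.mk ((t, c) :: l)).contains u = (PySem.Dict.mk l).contains u := by
      intro u hu
      simp [PySem.Dict.contains, List.any_cons, Ne.symm hu]
    have hmk_cons_g : ∀ u : String, u ≠ t →
        (PySem.Dict.mk ((t, c) :: l)).getD u 0 = (PySem.Dict.mk l).getD u 0 := by
      intro u hu
      simp [PySem.Dict.getD, PySem.Dict.get?, Ne.symm hu]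
    simp only [List.foldl_cons]
    by_cases h : d0.contains t = true
    · -- existing key: in-place update, no append
      rw [pv_stepB_of_contains pc ac d0 t c h]
      set v : PySem.Dict String Int := (d0.getD t PySem.Dict.empty).modify pc 0 (· + c) with hv
      have hitems : (d0.insert t v).items = d0.items.map (fun p => if p.1 == t then (t, v) else p) :=
        PySem.Dict.items_insert_of_contains _ _ h
      have hkeys : (d0.insert t v).items.map Prod.fst = d0.items.map Prod.fst := by
        rw [hitems, List.map_map]
        apply List.map_congr_left
        intro p _
        by_cases hp : p.1 = t <;> simp [hp]
      rw [ih (d0.insert t v) hl' (by rw [hkeys]; exact hd0)]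
      have hcont' : ∀ u : String, (d0.insert t v).contains u = d0.contains u := by
        intro u
        rw [PySem.Dict.contains_insert]
        by_cases hu : u = t
        · simp [hu, h]
        · simp [hu]
      congr 1
      · -- mapped parts agree
        rw [hitems, List.map_map]
        apply List.map_congr_left
        intro p hp
        simp only [Function.comp]
        by_cases hpt : p.1 = t
        · have e0 : (p.1 == t) = true := by simpa using hpt
          have hget : d0.getD t PySem.Dict.empty = p.2 := by
            apply PySem.Dict.getD_of_mem_items
            · rw [← hpt]; exact hp
            · simpa [PySem.Dict.keys] using hd0
          simp only [e0, if_true]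
          rw [show pvUpd pc (PySem.Dict.mk l) (t, v) = (t, v) by simp [pvUpd, hcl']]
          have hcc : (PySem.Dict.mk ((t, c) :: l)).contains p.1 = true := by
            simp [PySem.Dict.contains, List.any_cons, hpt]
          have hgD : (PySem.Dict.mk ((t, c) :: l)).getD p.1 0 = c := by
            simp [hpt, PySem.Dict.getD, PySem.Dict.get?]
          simp only [pvUpd, hcc, if_true, hgD]
          rw [hv, hget, hpt]
        · have e0 : (p.1 == t) = false := by simpa using hpt
          simp only [e0, Bool.false_eq_true, if_false, pvUpd, hmk_cons_c p.1 hpt,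
            hmk_cons_g p.1 hpt]
      · -- filtered parts agree
        rw [List.filter_cons, if_neg (by simp [h])]
        refine congrArg _ (List.filter_congr ?_)
        intro q hq
        rw [hcont']
    · -- new key: appended, count kept for the filter
      have h' : d0.contains t = false := by simpa using h
      rw [pv_stepB_of_not_contains pc ac d0 t c h', PySem.Dict.insert_insert_self]
      set v : PySem.Dict String Int := (pvZeroRow ac).modify pc 0 (· + c) with hv
      have hitems : (d0.insert t v).items = d0.items ++ [(t, v)] :=
        PySem.Dict.items_insert_of_not_contains _ _ h'
      have htd0 : t ∉ d0.items.map Prod.fst := by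
        intro hmem
        have hct : d0.contains t = true := by
          simp only [PySem.Dict.contains, List.any_eq_true]
          obtain ⟨p, hp, hpt⟩ := List.mem_map.mp hmem
          exact ⟨p, hp, by simp [hpt]⟩
        rw [hct] at h'; cases h'
      have hnd1 : ((d0.insert t v).items.map Prod.fst).Nodup := by
        rw [hitems]
        simp only [List.map_append, List.map_cons, List.map_nil]
        simp [List.nodup_append, hd0]
        intro a x hax haeq
        exact htd0 (haeq ▸ List.mem_map_of_mem hax)
      rw [ih (d0.insert t v) hl' hnd1]
      have hcont' : ∀ q ∈ l, (d0.insert t v).contains q.1 = d0.contains q.1 := by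
        intro q hq
        rw [PySem.Dict.contains_insert]
        have hqt : q.1 ≠ t := fun hh => htl (hh ▸ List.mem_map_of_mem hq)
        simp [hqt]
      rw [hitems, List.map_append, List.filter_cons, if_pos (by simp [h'])]
      rw [show (List.map (pvUpd pc (PySem.Dict.mk l)) [(t, v)])
            = [(t, v)] by simp [pvUpd, hcl']]
      rw [List.append_assoc]
      congr 1
      · -- existing entries untouched by either counter
        apply List.map_congr_left
        intro p hp
        have hpt : p.1 ≠ t := fun hh => htd0 (hh ▸ List.mem_map_of_mem hp)
        simp only [pvUpd, hmk_cons_c p.1 hpt, hmk_cons_g p.1 hpt]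
      · -- the appended row is the head of the filtered-map
        rw [List.filter_congr (fun q hq => by rw [hcont' q hq])]
        simp [hv]

-- erasing one key does not change lookups at other keys
theorem pv_contains_erase {ν : Type} (cnt : PySem.Dict String ν) (k u : String) (h : u ≠ k) :
    (cnt.erase k).contains u = cnt.contains u := by
  obtain ⟨items⟩ := cnt
  simp only [PySem.Dict.erase, PySem.Dict.contains, List.any_filter]
  induction items with
  | nil => rfl
  | cons p l ih =>
    simp only [List.any_cons, ih]
    congr 1
    by_cases hp : p.1 = u
    · simp [hp, h]
    · simp [hp]

theorem pv_getD_erase {ν : Type} (cnt : PySem.Dict String ν) (k u : String) (h : u ≠ k) (d0 : ν) :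
    (cnt.erase k).getD u d0 = cnt.getD u d0 := by
  obtain ⟨items⟩ := cnt
  simp only [PySem.Dict.erase, PySem.Dict.getD, PySem.Dict.get?]
  induction items with
  | nil => rfl
  | cons p l ih =>
    rw [List.filter_cons]
    by_cases hpk : p.1 = k
    · rw [if_neg (by simp [hpk]), List.find?_cons_of_neg (by simp [hpk, Ne.symm h])]
      exact ih
    · rw [if_pos (by simp [hpk])]
      by_cases hpu : p.1 = u
      · rw [List.find?_cons_of_pos (by simp [hpu]), List.find?_cons_of_pos (by simp [hpu])]
      · rw [List.find?_cons_of_neg (by simp [hpu]), List.find?_cons_of_neg (by simp [hpu])]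
        exact ih

-- a phase-1 fold over entries whose keys avoid the head key ignores the head entry
theorem pv_phase1_cons (pc : String) :
    ∀ (xs : List (String × PySem.Dict String Int)) (h : String × PySem.Dict String Int)
      (l : List (String × PySem.Dict String Int)) (cnt : PySem.Dict String Int),
      (∀ p ∈ xs, p.1 ≠ h.1) →
      xs.foldl (pvPhase1B pc) (PySem.Dict.mk (h :: l), cnt)
        = (PySem.Dict.mk (h :: (xs.foldl (pvPhase1B pc) (PySem.Dict.mk l, cnt)).1.items),
           (xs.foldl (pvPhase1B pc) (PySem.Dict.mk l, cnt)).2) := by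
  intro xs
  induction xs with
  | nil => intro h l cnt _; rfl
  | cons p xs ih =>
    intro h l cnt hne
    have hph : p.1 ≠ h.1 := hne p List.mem_cons_self
    have hne' : ∀ q ∈ xs, q.1 ≠ h.1 := fun q hq => hne q (List.mem_cons_of_mem p hq)
    simp only [List.foldl_cons]
    by_cases hc : cnt.contains p.1 = true
    · set w := p.2.modify pc 0 (· + cnt.getD p.1 0) with hw
      have hstep_big : pvPhase1B pc (PySem.Dict.mk (h :: l), cnt) p
          = ((PySem.Dict.mk (h :: l)).insert p.1 w, cnt.erase p.1) := by
        simp [pvPhase1B, hc, hw]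
      have hstep_small : pvPhase1B pc (PySem.Dict.mk l, cnt) p
          = ((PySem.Dict.mk l).insert p.1 w, cnt.erase p.1) := by
        simp [pvPhase1B, hc, hw]
      have hch : (PySem.Dict.mk (h :: l)).contains p.1 = (PySem.Dict.mk l).contains p.1 := by
        simp only [PySem.Dict.contains, List.any_cons]
        rw [show (h.1 == p.1) = false by simp [Ne.symm hph]]
        simp
      have hins : (PySem.Dict.mk (h :: l)).insert p.1 w
          = PySem.Dict.mk (h :: ((PySem.Dict.mk l).insert p.1 w).items) := by
        by_cases hcl : (PySem.Dict.mk l).contains p.1 = true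
        · rw [PySem.Dict.insert, if_pos (by rw [hch]; exact hcl),
              PySem.Dict.insert, if_pos hcl]
          congr 1
          simp only [List.map_cons]
          rw [if_neg (by simp [Ne.symm hph])]
        · have hcl' : (PySem.Dict.mk l).contains p.1 = false := by
            cases hx : (PySem.Dict.mk l).contains p.1
            · rfl
            · exact absurd hx hcl
          rw [PySem.Dict.insert, if_neg (by rw [hch, hcl']; simp),
              PySem.Dict.insert, if_neg (by rw [hcl']; simp)]
          rfl
      rw [hstep_big, hstep_small, hins]
      have := ih h ((PySem.Dict.mk l).insert p.1 w).items (cnt.erase p.1) hne'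
      rw [show PySem.Dict.mk ((PySem.Dict.mk l).insert p.1 w).items
            = (PySem.Dict.mk l).insert p.1 w from rfl] at this
      exact this
    · have hc' : cnt.contains p.1 = false := by simpa using hc
      have hstep_big : pvPhase1B pc (PySem.Dict.mk (h :: l), cnt) p = (PySem.Dict.mk (h :: l), cnt) := by
        simp [pvPhase1B, hc']
      have hstep_small : pvPhase1B pc (PySem.Dict.mk l, cnt) p = (PySem.Dict.mk l, cnt) := by
        simp [pvPhase1B, hc']
      rw [hstep_big, hstep_small]
      exact ih h l cnt hne'

-- characterization of phase 1: entries updated in place, consumed counts removed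
theorem pv_phase1_char (pc : String) :
    ∀ (l : List (String × PySem.Dict String Int)) (cnt : PySem.Dict String Int),
      (l.map Prod.fst).Nodup →
      l.foldl (pvPhase1B pc) (PySem.Dict.mk l, cnt)
        = (PySem.Dict.mk (l.map (pvUpd pc cnt)),
           PySem.Dict.mk (cnt.items.filter (fun q => !(PySem.Dict.mk l).contains q.1))) := by
  intro l
  induction l with
  | nil =>
    intro cnt _
    simp only [List.foldl_nil, List.map_nil]
    refine congrArg₂ Prod.mk rfl (PySem.Dict.ext ?_)
    show cnt.items = List.filter _ cnt.items
    rw [List.filter_congr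
          (p := fun (q : String × Int) =>
            !(PySem.Dict.mk ([] : List (String × PySem.Dict String Int))).contains q.1)
          (q := fun _ => true) (fun q _ => rfl),
        List.filter_true]
  | cons h l ih =>
    intro cnt hnd
    have hhl : h.1 ∉ l.map Prod.fst := (List.nodup_cons.mp (by simpa using hnd)).1
    have hnd' : (l.map Prod.fst).Nodup := (List.nodup_cons.mp (by simpa using hnd)).2
    have hne : ∀ p ∈ l, p.1 ≠ h.1 := fun p hp he => hhl (he ▸ List.mem_map_of_mem hp)
    simp only [List.foldl_cons]
    by_cases hc : cnt.contains h.1 = true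
    · set w := h.2.modify pc 0 (· + cnt.getD h.1 0) with hw
      have hstep : pvPhase1B pc (PySem.Dict.mk (h :: l), cnt) h
          = ((PySem.Dict.mk (h :: l)).insert h.1 w, cnt.erase h.1) := by
        simp [pvPhase1B, hc, hw]
      have hhead : (PySem.Dict.mk (h :: l)).contains h.1 = true := by
        simp [PySem.Dict.contains, List.any_cons]
      have hins : (PySem.Dict.mk (h :: l)).insert h.1 w = PySem.Dict.mk ((h.1, w) :: l) := by
        rw [PySem.Dict.insert, if_pos hhead]
        congr 1
        simp only [List.map_cons]
        rw [if_pos (by simp)]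
        rw [List.map_congr_left (g := id) (fun p hp => by simp [hne p hp]), List.map_id]
      have hmap : (h :: l).map (pvUpd pc cnt)
          = (h.1, w) :: l.map (pvUpd pc (cnt.erase h.1)) := by
        simp only [List.map_cons]
        congr 1
        · simp [pvUpd, hc, hw]
        · apply List.map_congr_left
          intro p hp
          simp only [pvUpd, pv_contains_erase cnt h.1 p.1 (hne p hp),
            pv_getD_erase cnt h.1 p.1 (hne p hp)]
      have hfilt : (cnt.erase h.1).items.filter
            (fun q => !(PySem.Dict.mk l).contains q.1)
          = cnt.items.filter (fun q => !(PySem.Dict.mk (h :: l)).contains q.1) := by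
        rw [show (cnt.erase h.1).items
              = cnt.items.filter (fun q => !(q.1 == h.1)) from rfl,
            List.filter_filter]
        apply List.filter_congr
        intro q hq
        by_cases hqh : q.1 = h.1
        · simp [PySem.Dict.contains, List.any_cons, hqh]
        · have e1 : (h.1 == q.1) = false := by simp [Ne.symm hqh]
          have e2 : (q.1 == h.1) = false := by simp [hqh]
          simp [PySem.Dict.contains, List.any_cons, e1, e2]
      rw [hstep, hins, pv_phase1_cons pc l (h.1, w) l (cnt.erase h.1) hne,
          ih (cnt.erase h.1) hnd']
      show (PySem.Dict.mk ((h.1, w) :: l.map (pvUpd pc (cnt.erase h.1))),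
            PySem.Dict.mk ((cnt.erase h.1).items.filter
              (fun q => !(PySem.Dict.mk l).contains q.1))) = _
      rw [← hmap, hfilt]
    · have hc' : cnt.contains h.1 = false := by simpa using hc
      have hstep : pvPhase1B pc (PySem.Dict.mk (h :: l), cnt) h = (PySem.Dict.mk (h :: l), cnt) := by
        simp [pvPhase1B, hc']
      rw [hstep, pv_phase1_cons pc l h l cnt hne, ih cnt hnd']
      have hkeys : ∀ q ∈ cnt.items, (q.1 == h.1) = false := by
        have := hc'
        simp only [PySem.Dict.contains, List.any_eq_false] at this
        intro q hq
        simpa using this q hq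
      have hmap : (h :: l).map (pvUpd pc cnt) = h :: l.map (pvUpd pc cnt) := by
        simp only [List.map_cons]
        congr 1
        simp [pvUpd, hc']
      have hfilt : cnt.items.filter (fun q => !(PySem.Dict.mk l).contains q.1)
          = cnt.items.filter (fun q => !(PySem.Dict.mk (h :: l)).contains q.1) := by
        apply List.filter_congr
        intro q hq
        have hqh : q.1 ≠ h.1 := by simpa using hkeys q hq
        simp [PySem.Dict.contains, List.any_cons, Ne.symm hqh]
      show (PySem.Dict.mk (h :: l.map (pvUpd pc cnt)),
            PySem.Dict.mk (cnt.items.filter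
              (fun q => !(PySem.Dict.mk l).contains q.1))) = _
      rw [← hmap, hfilt]

-- the in-place updates of phase 1 do not change which keys are present
theorem pv_contains_mk_mapUpd (pc : String) (cnt : PySem.Dict String Int)
    (l : List (String × PySem.Dict String Int)) (u : String) :
    (PySem.Dict.mk (l.map (pvUpd pc cnt))).contains u = (PySem.Dict.mk l).contains u := by
  simp only [PySem.Dict.contains, List.any_map]
  congr 1
  funext p
  simp [Function.comp, pv_fst_upd]

-- ===== VERDICT (by name: the statement is the Claim_ definition above) =====
theorem updateDictWords_spec : Claim_equal_updateDictWords := by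
  intro dw toks pc ac _ hpre
  obtain ⟨hnd, -⟩ := hpre
  unfold Spec_updateDictWords updateDictWords updateDictWords_alt
  have hnd0 : ((dw.map (fun p => (p.1, PySem.Dict.mk p.2))).map Prod.fst).Nodup := by
    rw [List.map_map]
    simpa [Function.comp] using hnd
  have hcnt : pvCountsB toks = PySem.Dict.counter toks :=
    PySem.Dict.foldl_insert_getD_add_one_eq_counter toks
  have hndc : (((PySem.Dict.counter toks).items).map Prod.fst).Nodup := by
    simpa [PySem.Dict.keys] using PySem.Dict.nodup_keys_counter toks
  rw [pv_fold_eq, pv_foldB_char pc ac _ _ hndc hnd0]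
  simp only [hcnt]
  rw [pv_phase1_char pc _ _ hnd0]
  set cnt := PySem.Dict.counter toks with hcntdef
  set dwm := dw.map (fun p => (p.1, PySem.Dict.mk p.2)) with hdwm
  set filtered := cnt.items.filter (fun q => !(PySem.Dict.mk dwm).contains q.1) with hfil
  have hfresh : ∀ q ∈ filtered, (PySem.Dict.mk (dwm.map (pvUpd pc cnt))).contains q.1 = false := by
    intro q hq
    rw [pv_contains_mk_mapUpd]
    have := (List.mem_filter.mp (hfil ▸ hq)).2
    simpa using this
  have hndf : (filtered.map Prod.fst).Nodup :=
    hndc.sublist (List.Sublist.map Prod.fst List.filter_sublist)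
  rw [PySem.Dict.items_foldl_insert_fresh filtered Prod.fst
        (fun q => pvRowB pc ac q.2) _ hfresh hndf]
  rw [show (PySem.Dict.mk (dwm.map (pvUpd pc cnt))).items = dwm.map (pvUpd pc cnt) from rfl]
  congr 1
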